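-- pv_equiv track=rewrite | github.com/Kleinster2/portuguese-drills-expanded | utils/phonetic_direct.py | _apply_stress
-- ===== SOURCE A (Python) =====
-- def _apply_stress(result, is_stressed):
--     """Capitalize stressed syllables, lowercase unstressed. Strip <> markers."""
--     output = ''
--     i = 0
--     while i < len(result):
--         if result[i] == '<':
--             close = result.find('>', i)
--             if close != -1:
--                 output += result[i+1:close]
--                 i = close + 1
--                 continue
--         output += result[i].upper() if is_stressed else result[i].lower()
--         i += 1
--     return output
-- ===== SOURCE B (Python) =====
-- def _apply_stress(result, is_stressed):
--     """Capitalize stressed syllables, lowercase unstressed. Strip <> markers.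
--
--     Segment-based rewrite: instead of walking the string character by
--     character, jump from marker to marker with str.find, case-fold each
--     plain segment as a whole slice, copy each <...> interior verbatim,
--     and join the pieces at the end.
--     """
--     fold = str.upper if is_stressed else str.lower
--     pieces = []
--     pos = 0
--     while True:
--         open_ = result.find('<', pos)
--         if open_ == -1:
--             pieces.append(fold(result[pos:]))
--             break
--         close = result.find('>', open_ + 1)
--         if close == -1:
--             pieces.append(fold(result[pos:]))
--             break
--         pieces.append(fold(result[pos:open_]))
--         pieces.append(result[open_ + 1:close])
--         pos = close + 1
--     return ''.join(pieces)
-- ===== Notes on version B (the rewrite author's own statement) =====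
-- stated objective: faster
-- what changed: Replaces the per-character index loop with a segment scan: jump to the next '<'/'>' pair with find, case-fold each whole plain segment as one slice, copy each marker interior verbatim, and join the collected pieces at the end.
import Mathlib
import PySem

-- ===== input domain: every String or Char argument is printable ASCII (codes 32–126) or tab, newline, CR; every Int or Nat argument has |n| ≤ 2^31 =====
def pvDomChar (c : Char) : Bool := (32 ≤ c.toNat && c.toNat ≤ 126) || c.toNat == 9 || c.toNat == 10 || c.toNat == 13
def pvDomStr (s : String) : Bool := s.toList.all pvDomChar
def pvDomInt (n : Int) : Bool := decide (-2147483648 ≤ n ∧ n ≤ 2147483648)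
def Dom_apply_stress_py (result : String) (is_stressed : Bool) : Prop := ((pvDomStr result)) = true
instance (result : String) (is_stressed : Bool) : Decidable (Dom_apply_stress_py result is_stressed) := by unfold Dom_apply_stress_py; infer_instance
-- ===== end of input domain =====

-- B replaces A's per-character index loop by a per-segment scan (find the next
-- '<'…'>' pair, case-fold each plain segment whole, copy marker interiors, join);
-- measured constant-factor speedup in Python.


-- ===== PORT A =====
-- result[i].upper() / result[i].lower() on a one-character string
def pvFoldChar (b : Bool) (c : Char) : Char :=
  if b then PySem.Chars.upperChar c else PySem.Chars.lowerChar c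

-- A's while-loop over index i, transcribed as recursion on the suffix result[i:];
-- 'close = result.find('>', i)' relative to i is Chars.find on the current suffix,
-- 'result[i+1:close]' is the suffix slice [1:close-i].
def pvAGo (b : Bool) : List Char → List Char
  | [] => []
  | c :: rest =>
    if c = '<' then
      let close := PySem.Chars.find (c :: rest) ['>']
      if close ≠ -1 then
        PySem.List.slice (c :: rest) (some 1) (some close) ++
          pvAGo b ((c :: rest).drop (close.toNat + 1))
      else pvFoldChar b c :: pvAGo b rest
    else pvFoldChar b c :: pvAGo b rest
  termination_by s => s.length
  decreasing_by all_goals (simp [List.length_drop]; try omega)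

def apply_stress_py (result : String) (is_stressed : Bool) : String :=
  String.ofList (pvAGo is_stressed result.toList)

-- ===== PORT B =====
-- fold(seg) = seg.upper() / seg.lower() on a whole segment
def pvFoldSeg (b : Bool) (s : List Char) : List Char :=
  if b then PySem.Chars.upper s else PySem.Chars.lower s

-- Source B's while-loop over pos, transcribed as recursion on the suffix result[pos:];
-- 'result.find('<', pos)' relative to pos is Chars.find on the suffix,
-- 'result.find('>', open_+1)' is Chars.findFrom on the suffix; the collected
-- pieces are joined by ''.join at the end.
def pvBGo (b : Bool) (s : List Char) : List (List Char) :=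
  let op := PySem.Chars.find s ['<']
  if op = -1 then [pvFoldSeg b s]
  else
    let close := PySem.Chars.findFrom s ['>'] (op + 1)
    if close = -1 then [pvFoldSeg b s]
    else
      pvFoldSeg b (PySem.List.slice s (some 0) (some op)) ::
      PySem.List.slice s (some (op + 1)) (some close) ::
      pvBGo b (s.drop (close.toNat + 1))
  termination_by s.length
  decreasing_by
    simp only [List.length_drop]
    rename_i hop hcl
    have hin : ('<') ∈ s := by
      have h := (PySem.Chars.find_ne_neg_one_iff s ['<']).mp hop
      exact h.subset (by simp)
    have hne : s ≠ [] := by rintro rfl; simp at hin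
    have : 0 < s.length := List.length_pos_iff.mpr hne
    omega

def apply_stress_py_alt (result : String) (is_stressed : Bool) : String :=
  String.ofList (PySem.Chars.join [] (pvBGo is_stressed result.toList))

-- ===== PRECONDITION & SPEC =====
def Spec_apply_stress_py (result : String) (is_stressed : Bool) (out : String) : Prop := out = apply_stress_py_alt result is_stressed
instance (result : String) (is_stressed : Bool) (out : String) : Decidable (Spec_apply_stress_py result is_stressed out) := by unfold Spec_apply_stress_py; infer_instance

-- ===== CLAIM (what is proved, stated in full; the proofs are below) =====
def Claim_equal_apply_stress_py : Prop := ∀ (result : String) (is_stressed : Bool), Dom_apply_stress_py result is_stressed → Spec_apply_stress_py result is_stressed (apply_stress_py result is_stressed)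

-- ===== LEMMAS AND PROOFS =====

theorem pvJoin_nil_eq_flatten : ∀ ps : List (List Char), PySem.Chars.join [] ps = ps.flatten
  | [] => by simp [PySem.Chars.join_nil]
  | [p] => by simp [PySem.Chars.join_singleton]
  | p :: q :: rest => by
      rw [PySem.Chars.join_cons_cons, pvJoin_nil_eq_flatten (q :: rest)]
      simp

theorem pvSingleton_prefix_head {c : Char} {t : List Char} : [c] <+: t ↔ t[0]? = some c := by
  cases t <;> simp [List.cons_prefix_cons, eq_comm]

theorem pvSingleton_prefix_drop {c : Char} {s : List Char} {j : Nat} :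
    [c] <+: s.drop j ↔ s[j]? = some c := by
  rw [pvSingleton_prefix_head, List.getElem?_drop]
  simp

theorem pvFind_eq_neg_one {c : Char} {s : List Char} (h : c ∉ s) :
    PySem.Chars.find s [c] = -1 := by
  by_contra hne
  exact h ((List.singleton_infix_iff c s).mp ((PySem.Chars.find_ne_neg_one_iff s [c]).mp hne))

theorem pvFind_first {c : Char} (pre tail : List Char) (h : c ∉ pre) :
    PySem.Chars.find (pre ++ c :: tail) [c] = (pre.length : Int) := by
  set s := pre ++ c :: tail with hs
  have hmem : c ∈ s := by simp [hs]
  have h0 : 0 ≤ PySem.Chars.find s [c] :=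
    (PySem.Chars.find_nonneg_iff s [c]).mpr ((List.singleton_infix_iff c s).mpr hmem)
  obtain ⟨hpref, hmin⟩ := PySem.Chars.find_spec h0
  set n := (PySem.Chars.find s [c]).toNat with hn
  have hget : s[n]? = some c := pvSingleton_prefix_drop.mp hpref
  have hgetpre : s[pre.length]? = some c := by
    rw [hs, List.getElem?_append_right (le_refl _)]; simp
  have h1 : ¬ n < pre.length := by
    intro hlt
    have hpg : pre[n]? = some c := by
      rw [← List.getElem?_append_left (l₂ := c :: tail) hlt, ← hs]; exact hget
    exact h (List.mem_of_getElem? hpg)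
  have h2 : ¬ pre.length < n := fun hlt =>
    hmin pre.length hlt (pvSingleton_prefix_drop.mpr hgetpre)
  have heq : n = pre.length := by omega
  rw [← Int.toNat_of_nonneg h0, ← hn, heq]

theorem pvFoldSeg_nil (b : Bool) : pvFoldSeg b [] = [] := by
  cases b <;> simp [pvFoldSeg, PySem.Chars.upper, PySem.Chars.lower]

theorem pvFoldSeg_cons (b : Bool) (c : Char) (s : List Char) :
    pvFoldSeg b (c :: s) = pvFoldChar b c :: pvFoldSeg b s := by
  cases b <;> simp [pvFoldSeg, pvFoldChar, PySem.Chars.upper, PySem.Chars.lower]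

theorem pvFoldSeg_append (b : Bool) (s t : List Char) :
    pvFoldSeg b (s ++ t) = pvFoldSeg b s ++ pvFoldSeg b t := by
  cases b <;> simp [pvFoldSeg, PySem.Chars.upper, PySem.Chars.lower]

-- in a suffix with no '>', A case-folds every character
theorem pvAGo_no_gt (b : Bool) (s : List Char) (h : ('>') ∉ s) :
    pvAGo b s = pvFoldSeg b s := by
  induction s with
  | nil => simp [pvAGo, pvFoldSeg_nil]
  | cons c rest ih =>
    have hrest : ('>') ∉ rest := fun hm => h (List.mem_cons_of_mem _ hm)
    rw [pvAGo, pvFoldSeg_cons, ← ih hrest]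
    by_cases hc : c = '<'
    · subst hc
      have hfind : PySem.Chars.find ('<' :: rest) ['>'] = -1 := pvFind_eq_neg_one h
      simp [hfind]
    · simp [hc]

-- in a suffix with no '<', A case-folds every character
theorem pvAGo_no_lt (b : Bool) (s : List Char) (h : ('<') ∉ s) :
    pvAGo b s = pvFoldSeg b s := by
  induction s with
  | nil => simp [pvAGo, pvFoldSeg_nil]
  | cons c rest ih =>
    have hc : ¬ c = '<' := fun hc => h (by simp [hc])
    have hrest : ('<') ∉ rest := fun hm => h (List.mem_cons_of_mem _ hm)
    rw [pvAGo, pvFoldSeg_cons, ← ih hrest]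
    simp [hc]

-- A distributes over a marker-free prefix
theorem pvAGo_append_no_lt (b : Bool) (pre t : List Char) (h : ('<') ∉ pre) :
    pvAGo b (pre ++ t) = pvFoldSeg b pre ++ pvAGo b t := by
  induction pre with
  | nil => simp [pvFoldSeg_nil]
  | cons c pre' ih =>
    have hc : ¬ c = '<' := fun hc => h (by simp [hc])
    have hpre' : ('<') ∉ pre' := fun hm => h (List.mem_cons_of_mem _ hm)
    rw [List.cons_append, pvAGo, pvFoldSeg_cons]
    simp [hc, ih hpre']

-- one step of B agrees with A, given the IH on shorter suffixes
theorem pvStep (b : Bool) (s : List Char)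
    (IH : ∀ t : List Char, t.length < s.length → pvAGo b t = (pvBGo b t).flatten) :
    pvAGo b s = (pvBGo b s).flatten := by
  by_cases hop : PySem.Chars.find s ['<'] = -1
  · have hnl : ('<') ∉ s := fun hmem =>
      absurd hop ((PySem.Chars.find_ne_neg_one_iff s ['<']).mpr
        ((List.singleton_infix_iff _ _).mpr hmem))
    rw [pvAGo_no_lt b s hnl, pvBGo]
    simp [hop]
  · have h0 : 0 ≤ PySem.Chars.find s ['<'] := by
      have := PySem.Chars.neg_one_le_find s ['<']; omega
    obtain ⟨hpref, hmin⟩ := PySem.Chars.find_spec h0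
    set n := (PySem.Chars.find s ['<']).toNat with hn
    have hfind : PySem.Chars.find s ['<'] = (n : Int) := (Int.toNat_of_nonneg h0).symm
    have hsn : s[n]? = some '<' := pvSingleton_prefix_drop.mp hpref
    have hnlen : n < s.length := (List.getElem?_eq_some_iff.mp hsn).1
    have hsget : s[n] = '<' := by
      rw [List.getElem?_eq_getElem hnlen] at hsn; exact Option.some.inj hsn
    have hs_decomp : s = s.take n ++ '<' :: s.drop (n + 1) := by
      conv_lhs => rw [← List.take_append_drop n s, List.drop_eq_getElem_cons hnlen, hsget]
    have hpre_no : ('<') ∉ s.take n := by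
      intro hm
      rcases List.mem_take_iff_getElem.mp hm with ⟨j, hj, hje⟩
      have hjn : j < n := by omega
      exact hmin j hjn (pvSingleton_prefix_drop.mpr
        (by rw [List.getElem?_eq_getElem (by omega)]; exact congrArg some hje))
    have hpre_len : (s.take n).length = n := by simp [List.length_take]; omega
    have hlen1 : n + 1 ≤ s.length := hnlen
    have hcast1 : (n : Int) + 1 = ((n + 1 : ℕ) : Int) := by push_cast; ring
    have hclose : PySem.Chars.findFrom s ['>'] (PySem.Chars.find s ['<'] + 1) =
        (if PySem.Chars.find (s.drop (n+1)) ['>'] = -1 then -1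
         else ((n + 1 : ℕ) : Int) + PySem.Chars.find (s.drop (n+1)) ['>']) := by
      rw [hfind, hcast1, PySem.Chars.findFrom_natCast s ['>'] (n+1) hlen1]
    by_cases hg : PySem.Chars.find (s.drop (n+1)) ['>'] = -1
    · -- no closing '>' anywhere after the first '<': everything is case-folded
      have hrest_no_gt : ('>') ∉ s.drop (n+1) := fun hm =>
        absurd hg ((PySem.Chars.find_ne_neg_one_iff _ ['>']).mpr
          ((List.singleton_infix_iff _ _).mpr hm))
      have hA : pvAGo b s = pvFoldSeg b s := by
        conv_lhs => rw [hs_decomp]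
        rw [pvAGo_append_no_lt b _ _ hpre_no]
        have hno : ('>') ∉ ('<' :: s.drop (n+1)) := by
          intro hm
          rcases List.mem_cons.mp hm with h1 | h1
          · exact absurd h1 (by decide)
          · exact hrest_no_gt h1
        rw [pvAGo_no_gt b _ hno, ← pvFoldSeg_append]
        conv_rhs => rw [hs_decomp]
      rw [hA, pvBGo]
      simp only [hop, if_false, hclose, hg, if_true]
      simp
    · -- matched marker
      have hg0 : 0 ≤ PySem.Chars.find (s.drop (n+1)) ['>'] := by
        have := PySem.Chars.neg_one_le_find (s.drop (n+1)) ['>']; omega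
      obtain ⟨hpref2, hmin2⟩ := PySem.Chars.find_spec hg0
      set m := (PySem.Chars.find (s.drop (n+1)) ['>']).toNat with hm
      have hgfind : PySem.Chars.find (s.drop (n+1)) ['>'] = (m : Int) :=
        (Int.toNat_of_nonneg hg0).symm
      have hrm : (s.drop (n+1))[m]? = some '>' := pvSingleton_prefix_drop.mp hpref2
      have hmlen : m < (s.drop (n+1)).length := (List.getElem?_eq_some_iff.mp hrm).1
      have hrget : (s.drop (n+1))[m] = '>' := by
        rw [List.getElem?_eq_getElem hmlen] at hrm; exact Option.some.inj hrm
      have hrest_decomp : s.drop (n+1) = (s.drop (n+1)).take m ++ '>' :: (s.drop (n+1)).drop (m+1) := by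
        conv_lhs => rw [← List.take_append_drop m (s.drop (n+1)),
          List.drop_eq_getElem_cons hmlen, hrget]
      have hmid_no : ('>') ∉ (s.drop (n+1)).take m := by
        intro hmm
        rcases List.mem_take_iff_getElem.mp hmm with ⟨j, hj, hje⟩
        have hjm : j < m := by omega
        exact hmin2 j hjm (pvSingleton_prefix_drop.mpr
          (by rw [List.getElem?_eq_getElem (by omega)]; exact congrArg some hje))
      have hmid_len : ((s.drop (n+1)).take m).length = m := by
        rw [List.length_take]; exact min_eq_left (le_of_lt hmlen)
      -- the closing index as a natural number
      have hclose' : PySem.Chars.findFrom s ['>'] (PySem.Chars.find s ['<'] + 1) =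
          ((n + 1 + m : ℕ) : Int) := by
        rw [hclose, if_neg hg, hgfind]; push_cast; ring
      -- A's step at the '<'
      have hfindA : PySem.Chars.find ('<' :: s.drop (n+1)) ['>'] = ((m + 1 : ℕ) : Int) := by
        have hsplit : ('<' :: s.drop (n+1)) = ('<' :: (s.drop (n+1)).take m) ++ '>' :: (s.drop (n+1)).drop (m+1) := by
          conv_lhs => rw [hrest_decomp]
          simp
        rw [hsplit, pvFind_first _ _ (by
          intro hmm
          rcases List.mem_cons.mp hmm with h1 | h1
          · exact absurd h1 (by decide)
          · exact hmid_no h1)]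
        simp [hmid_len]
      have hAcons : pvAGo b ('<' :: s.drop (n+1)) =
          (s.drop (n+1)).take m ++ pvAGo b ((s.drop (n+1)).drop (m+1)) := by
        rw [pvAGo]
        simp only [hfindA]
        have hne : ((m + 1 : ℕ) : Int) ≠ -1 := by omega
        simp only [hne, if_pos, ne_eq, not_false_iff]
        have hslice : PySem.List.slice ('<' :: s.drop (n+1)) (some 1) (some ((m + 1 : ℕ) : Int)) =
            (s.drop (n+1)).take m := by
          have h1 : (1 : Int) = ((1 : ℕ) : Int) := rfl
          rw [h1, PySem.List.slice_natCast]
          simp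
        have hdrop : (('<' :: s.drop (n+1)).drop (((m + 1 : ℕ) : Int).toNat + 1)) =
            (s.drop (n+1)).drop (m+1) := by
          simp
        rw [hslice, hdrop]
      -- assemble
      have htail_len : ((s.drop (n+1)).drop (m+1)).length < s.length := by
        simp [List.length_drop] at *
        omega
      have hne2 : ((n + 1 + m : ℕ) : Int) ≠ -1 := by omega
      have hslice0 : PySem.List.slice s (some 0) (some (PySem.Chars.find s ['<'])) = s.take n := by
        rw [hfind, PySem.List.slice_zero_start, PySem.List.slice_to_natCast]
      have hslice1 : PySem.List.slice s (some (PySem.Chars.find s ['<'] + 1)) (some ((n + 1 + m : ℕ) : Int)) =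
          (s.drop (n+1)).take m := by
        rw [hfind, hcast1]
        have : ((n + 1 + m : ℕ) : Int) = ((n + 1 : ℕ) : Int) + (m : ℕ) := by push_cast; ring
        rw [this, PySem.List.slice_natCast_add]
      have hdrop2 : s.drop (((n + 1 + m : ℕ) : Int).toNat + 1) = (s.drop (n+1)).drop (m+1) := by
        rw [List.drop_drop]
        congr 1
      have hBs : (pvBGo b s).flatten =
          pvFoldSeg b (s.take n) ++
            ((s.drop (n+1)).take m ++ (pvBGo b ((s.drop (n+1)).drop (m+1))).flatten) := by
        conv_lhs => rw [pvBGo]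
        simp only [hop, hclose', hne2, if_false, List.flatten_cons]
        rw [hslice0, hslice1, hdrop2]
      conv_lhs => rw [hs_decomp]
      rw [pvAGo_append_no_lt b _ _ hpre_no, hAcons, IH _ htail_len, hBs]

theorem pvMain (b : Bool) (s : List Char) : pvAGo b s = (pvBGo b s).flatten := by
  induction hN : s.length using Nat.strong_induction_on generalizing s with
  | _ N ih =>
    subst hN
    exact pvStep b s (fun t ht => ih t.length ht t rfl)

-- ===== VERDICT (by name: the statement is the Claim_ definition above) =====
theorem apply_stress_py_spec : Claim_equal_apply_stress_py := by
  intro result b _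
  unfold Spec_apply_stress_py apply_stress_py apply_stress_py_alt
  rw [pvJoin_nil_eq_flatten, pvMain]
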